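-- pv_equiv track=rewrite | github.com/pypi-data/pypi-mirror-386 | packages/api-dock/api_dock-0.0.6.tar.gz/api_dock-0.0.6/api_dock/database_config.py | find_database_route
-- ===== SOURCE A (Python) =====
-- from typing import Any, Dict, List, Optional
--
-- def find_database_route(path: str, database_config: Dict[str, Any]) -> Optional[Dict[str, Any]]:
--     """Find a database route configuration that matches the given path.
--
--     Args:
--         path: The incoming route path (e.g., "users/123/permissions").
--         database_config: Database configuration dictionary.
--
--     Returns:
--         Route configuration dict with 'route' and 'sql' keys, or None if not found.
--     """
--     routes = database_config.get("routes", [])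
--
--     for route_config in routes:
--         if isinstance(route_config, dict):
--             route_pattern = route_config.get("route", "")
--
--             # Check if path matches the route pattern
--             if _route_matches_pattern(path, route_pattern):
--                 return route_config
--
--     return None
--
-- def _route_matches_pattern(path: str, pattern: str) -> bool:
--     """Check if a path matches a route pattern.
--
--     Patterns use {{}} as wildcards for path segments.
--     Examples:
--         - "users/{{}}" matches "users/123"
--         - "users/{{user_id}}" matches "users/123"
--         - "users/{{user_id}}/permissions" matches "users/123/permissions"
--
--     Args:
--         path: The path to check.
--         pattern: The pattern to match against.
--
--     Returns:
--         True if path matches pattern, False otherwise.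
--     """
--     if not isinstance(pattern, str):
--         return False
--
--     path_parts = path.strip("/").split("/")
--     pattern_parts = pattern.strip("/").split("/")
--
--     if len(path_parts) != len(pattern_parts):
--         return False
--
--     for path_part, pattern_part in zip(path_parts, pattern_parts):
--         # Check if pattern part is a variable (starts and ends with double braces)
--         if pattern_part.startswith("{{") and pattern_part.endswith("}}"):
--             # Variable matches any value
--             continue
--         elif pattern_part != path_part:
--             # Literal part must match exactly
--             return False
--
--     return True
-- ===== SOURCE B (Python) =====
-- import re
-- from typing import Any, Dict, Optional
--
--
-- def _pattern_regex(pattern):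
--     """Compile a route pattern into an anchored regex: each literal segment is
--     re.escape'd, each {{...}} wildcard segment becomes [^/]* (cannot cross a
--     slash), segments joined by '/'. None for non-str patterns."""
--     if not isinstance(pattern, str):
--         return None
--     parts = pattern.strip("/").split("/")
--     return re.compile(
--         "/".join("[^/]*" if p.startswith("{{") and p.endswith("}}") else re.escape(p)
--                  for p in parts))
--
--
-- def find_database_route(path: str, database_config: Dict[str, Any]) -> Optional[Dict[str, Any]]:
--     # path.strip('/') equals '/'.join(path.strip('/').split('/')), so matching
--     # the anchored regex against it is segment-exact: [^/]* cannot absorb a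
--     # separator and escaped literals match verbatim.
--     target = path.strip("/")
--     for route_config in database_config.get("routes", []):
--         if isinstance(route_config, dict):
--             rx = _pattern_regex(route_config.get("route", ""))
--             if rx is not None and rx.fullmatch(target):
--                 return route_config
--     return None
-- ===== Notes on version B (the rewrite author's own statement) =====
-- stated objective: idiomatic
-- what changed: B replaces A's per-route strip/split/zip segment comparison loop by compiling each pattern into an anchored regex (re.escape for literal segments, [^/]* for {{...}} wildcards, joined by '/') and testing it with re.fullmatch against the stripped path; equivalence holds because [^/]* cannot cross a separator and escaped literals match verbatim, so the regex enforces the same segment count and per-segment matching.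
import Mathlib
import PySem

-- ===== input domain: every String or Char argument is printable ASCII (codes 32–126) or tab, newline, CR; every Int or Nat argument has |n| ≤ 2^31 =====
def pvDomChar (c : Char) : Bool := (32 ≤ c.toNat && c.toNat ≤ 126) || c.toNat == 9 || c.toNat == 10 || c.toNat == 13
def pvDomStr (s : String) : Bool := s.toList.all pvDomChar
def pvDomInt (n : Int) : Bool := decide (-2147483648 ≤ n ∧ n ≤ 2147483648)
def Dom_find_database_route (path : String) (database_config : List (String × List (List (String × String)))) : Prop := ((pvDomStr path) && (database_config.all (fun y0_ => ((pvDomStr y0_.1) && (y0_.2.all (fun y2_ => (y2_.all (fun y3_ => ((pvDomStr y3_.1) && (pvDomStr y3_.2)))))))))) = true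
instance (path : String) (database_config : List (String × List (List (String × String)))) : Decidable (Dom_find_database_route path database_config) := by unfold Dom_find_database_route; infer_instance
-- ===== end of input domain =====

-- B replaces A's per-route split-and-zip segment matcher by an anchored-regex match
-- (literal segments escaped, {{...}} segments as [^/]*) against the stripped path; idiomatic.

-- ===== PORT A =====
-- first-match association-list lookup (Python dict .get(key, default))
def pvAGetD {α : Type} (d : List (String × α)) (k : String) (dflt : α) : α :=
  match d with
  | [] => dflt
  | (k', v) :: rest => if k' = k then v else pvAGetD rest k dflt

-- s.strip("/").split("/")  (Python expression shared by A and B; sep ≠ "" so split? is some)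
def pvStripSplit (s : String) : List String :=
  (PySem.Str.split? (PySem.Str.stripChars s "/") "/").getD []

-- the `for path_part, pattern_part in zip(...)` loop of _route_matches_pattern
def pvMatchLoop : List (String × String) → Bool
  | [] => true
  | (s, p) :: rest =>
    if PySem.Str.startswith p "{{" && PySem.Str.endswith p "}}" then pvMatchLoop rest
    else if p ≠ s then false
    else pvMatchLoop rest

-- _route_matches_pattern (the pattern is always a str under the Lean types)
def pvRouteMatchesPattern (path pattern : String) : Bool :=
  let path_parts := pvStripSplit path
  let pattern_parts := pvStripSplit pattern
  if path_parts.length ≠ pattern_parts.length then false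
  else pvMatchLoop (path_parts.zip pattern_parts)

-- the `for route_config in routes` loop (route_config is always a dict under the Lean types)
def pvFindLoop (path : String) : List (List (String × String)) → Option (List (String × String))
  | [] => none
  | rc :: rest =>
    if pvRouteMatchesPattern path (pvAGetD rc "route" "") then some rc
    else pvFindLoop path rest

def find_database_route (path : String) (database_config : List (String × List (List (String × String)))) : Option (List (String × String)) :=
  pvFindLoop path (pvAGetD database_config "routes" [])

-- ===== PORT B =====
-- The regex B builds is a '/'-joined sequence of escaped literals and [^/]* pieces;
-- it is represented exactly by a token list: `ch c` matches the single char c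
-- (re.escape(p) matches exactly p's characters) and `star` is [^/]*.
inductive RTok : Type
  | ch : Char → RTok
  | star : RTok
deriving DecidableEq, Repr

-- _pattern_regex (the pattern is always a str under the Lean types):
-- "/".join("[^/]*" if wild else re.escape(p) for p in pattern.strip("/").split("/"))
def pvPatternRegex (pattern : String) : List RTok :=
  List.intercalate [RTok.ch '/']
    ((pvStripSplit pattern).map fun p =>
      if PySem.Str.startswith p "{{" && PySem.Str.endswith p "}}" then [RTok.star]
      else p.toList.map RTok.ch)

-- rx.fullmatch(target): hand port of the regex engine, exact on the regexes
-- _pattern_regex builds (every [^/]* is followed by a literal '/' or the end of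
-- the regex, so the greedy match up to the next '/' is the only candidate and
-- no backtracking is needed).
def pvReFullmatch : List RTok → List Char → Bool
  | [], cs => cs.isEmpty
  | RTok.ch _ :: _, [] => false
  | RTok.ch a :: ts, c :: cs => a == c && pvReFullmatch ts cs
  | RTok.star :: ts, cs => pvReFullmatch ts (cs.dropWhile (· ≠ '/'))

def find_database_route_alt (path : String) (database_config : List (String × List (List (String × String)))) : Option (List (String × String)) :=
  let target := (PySem.Str.stripChars path "/").toList
  (pvAGetD database_config "routes" []).find?
    (fun rc => pvReFullmatch (pvPatternRegex (pvAGetD rc "route" "")) target)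

-- ===== PRECONDITION & SPEC =====
def Spec_find_database_route (path : String) (database_config : List (String × List (List (String × String)))) (out : Option (List (String × String))) : Prop := out = find_database_route_alt path database_config
instance (path : String) (database_config : List (String × List (List (String × String)))) (out : Option (List (String × String))) : Decidable (Spec_find_database_route path database_config out) := by unfold Spec_find_database_route; infer_instance

-- ===== CLAIM (what is proved, stated in full; the proofs are below) =====
def Claim_equal_find_database_route : Prop := ∀ (path : String) (database_config : List (String × List (List (String × String)))), Dom_find_database_route path database_config → Spec_find_database_route path database_config (find_database_route path database_config)

-- ===== LEMMAS AND PROOFS =====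
-- reference recursion for splitting a char list at '/'
def splitC : List Char → List (List Char)
  | [] => [[]]
  | c :: rest =>
    if c = '/' then [] :: splitC rest
    else match splitC rest with
      | p :: ps => (c :: p) :: ps
      | [] => [[c]]

def isWildC (q : List Char) : Bool :=
  PySem.Chars.startswith q ['{', '{'] && PySem.Chars.endswith q ['}', '}']

def tokC (q : List Char) : List RTok :=
  if isWildC q then [RTok.star] else q.map RTok.ch

def chSeg (pq : List Char × List Char) : Bool := isWildC pq.2 || pq.1 == pq.2

theorem ofList_inj (p q : List Char) : (String.ofList p = String.ofList q) ↔ p = q :=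
  ⟨fun h => by have := congrArg String.toList h; simpa using this, fun h => h ▸ rfl⟩

theorem splitC_ne_nil (s : List Char) : splitC s ≠ [] := by
  induction s with
  | nil => simp [splitC]
  | cons c rest ih =>
    simp only [splitC]
    split
    · simp
    · split <;> simp

theorem noslash_splitC (s : List Char) : ∀ p ∈ splitC s, '/' ∉ p := by
  induction s with
  | nil => simp [splitC]
  | cons c rest ih =>
    simp only [splitC]
    split
    · intro p hp
      rw [List.mem_cons] at hp
      rcases hp with h | h
      · simp [h]
      · exact ih p h
    · rename_i hc
      split
      · rename_i p ps hps
        intro x hx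
        rw [List.mem_cons] at hx
        rcases hx with h | h
        · subst h
          intro hm
          rw [List.mem_cons] at hm
          rcases hm with h | h
          · exact hc h.symm
          · exact ih p (hps ▸ List.mem_cons_self ..) h
        · exact ih x (hps ▸ List.mem_cons_of_mem _ h)
      · rename_i hps
        exact absurd hps (splitC_ne_nil rest)

theorem join_splitC (s : List Char) : List.intercalate ['/'] (splitC s) = s := by
  induction s with
  | nil => simp [splitC, List.intercalate]
  | cons c rest ih =>
    simp only [splitC]
    split
    · rename_i hc
      subst hc
      rcases h : splitC rest with _ | ⟨p, ps⟩
      · exact absurd h (splitC_ne_nil rest)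
      · rw [show List.intercalate ['/'] ([] :: p :: ps) = '/' :: List.intercalate ['/'] (p :: ps) by
          simp [List.intercalate, List.intersperse]]
        rw [← h, ih]
    · rcases h : splitC rest with _ | ⟨p, ps⟩
      · exact absurd h (splitC_ne_nil rest)
      · rw [show List.intercalate ['/'] ((c :: p) :: ps) = c :: List.intercalate ['/'] (p :: ps) by
          simp [List.intercalate, List.intersperse]; cases ps <;> simp [List.intersperse]]
        rw [← h, ih]

theorem splitOn_go_spec (fuel : Nat) (l cur : List Char) (acc : List (List Char))
    (h : l.length < fuel) :
    PySem.Chars.splitOn.go ['/'] fuel l cur acc =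
      acc.reverse ++ (match splitC l with
        | p :: ps => (cur.reverse ++ p) :: ps
        | [] => []) := by
  induction fuel generalizing l cur acc with
  | zero => omega
  | succ f ih =>
    cases l with
    | nil => simp [PySem.Chars.splitOn.go, splitC]
    | cons c rest =>
      rw [PySem.Chars.splitOn.go]
      by_cases hc : c = '/'
      · subst hc
        rw [if_pos (by simp [List.isPrefixOf])]
        rw [ih _ _ _ (by simpa using Nat.lt_of_succ_lt_succ h)]
        rcases hs : splitC rest with _ | ⟨p, ps⟩
        · exact absurd hs (splitC_ne_nil rest)
        · simp [splitC, hs]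
      · rw [if_neg (by simp [List.isPrefixOf]; exact fun e => hc e.symm)]
        rw [ih _ _ _ (by simpa using Nat.lt_of_succ_lt_succ h)]
        rcases hs : splitC rest with _ | ⟨p, ps⟩
        · exact absurd hs (splitC_ne_nil rest)
        · simp [splitC, hc, hs]

theorem splitOn_eq_splitC (s : List Char) :
    PySem.Chars.splitOn s ['/'] = splitC s := by
  rw [PySem.Chars.splitOn, splitOn_go_spec _ _ _ _ (by omega)]
  rcases hs : splitC s with _ | ⟨p, ps⟩
  · exact absurd hs (splitC_ne_nil s)
  · simp

theorem pvStripSplit_eq (s : String) :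
    pvStripSplit s = (splitC (PySem.Chars.stripChars s.toList ['/'])).map String.ofList := by
  unfold pvStripSplit
  rw [PySem.Str.split?]
  have h1 : (PySem.Str.stripChars s "/").toList = PySem.Chars.stripChars s.toList ['/'] := by
    simpa using PySem.Str.toList_stripChars s "/"
  rw [h1]
  have h2 : ("/" : String).toList = ['/'] := rfl
  rw [h2, PySem.Chars.split?]
  simp [splitOn_eq_splitC]

theorem matchLoop_char (pp qq : List (List Char)) :
    pvMatchLoop ((pp.map String.ofList).zip (qq.map String.ofList)) = (pp.zip qq).all chSeg := by
  induction pp generalizing qq with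
  | nil => cases qq <;> simp [pvMatchLoop]
  | cons s rest ih =>
    cases qq with
    | nil => simp [pvMatchLoop]
    | cons p qrest =>
      simp only [List.map_cons, List.zip_cons_cons, List.all_cons, pvMatchLoop]
      have hw : (PySem.Str.startswith (String.ofList p) "{{" && PySem.Str.endswith (String.ofList p) "}}") = isWildC p := by
        simp [isWildC, PySem.Str.startswith_eq, PySem.Str.endswith_eq]
      rw [hw]
      by_cases h : isWildC p = true
      · simp [h, ih, chSeg]
      · rw [if_neg h]
        by_cases he : p = s
        · simp [he, ih, chSeg, h]
        · rw [if_pos ((ofList_inj p s).not.mpr he)]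
          have hc : chSeg (s, p) = false := by
            simp only [chSeg, Bool.or_eq_false_iff, beq_eq_false_iff_ne, ne_eq]
            exact ⟨by simpa using h, fun e => he e.symm⟩
          rw [hc, Bool.false_and]

theorem lit_match (q : List Char) (ts : List RTok) (cs : List Char) :
    pvReFullmatch (q.map RTok.ch ++ ts) cs =
      if q.isPrefixOf cs then pvReFullmatch ts (cs.drop q.length) else false := by
  induction q generalizing cs with
  | nil => simp [List.isPrefixOf]
  | cons a q' ih =>
    cases cs with
    | nil => simp [pvReFullmatch, List.isPrefixOf]
    | cons c cs' =>
      simp only [List.map_cons, List.cons_append, pvReFullmatch, List.isPrefixOf, List.length_cons,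
        List.drop_succ_cons, ih]
      by_cases hac : a = c
      · simp [hac]
      · simp [hac]

theorem inter2 {α : Type} (s : α) (a : List α) (l : List (List α)) (h : l ≠ []) :
    List.intercalate [s] (a :: l) = a ++ s :: List.intercalate [s] l := by
  cases l with
  | nil => exact absurd rfl h
  | cons b l' => simp [List.intercalate, List.intersperse]

theorem inter1 {α : Type} (s : α) (a : List α) : List.intercalate [s] [a] = a := by
  simp [List.intercalate]

theorem dw_nil (p : List Char) (h : '/' ∉ p) : p.dropWhile (· ≠ '/') = [] :=
  List.dropWhile_eq_nil_iff.mpr (fun x hx => by simp; exact fun e => h (e ▸ hx))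

theorem dw_app (p R : List Char) (h : '/' ∉ p) :
    (p ++ '/' :: R).dropWhile (· ≠ '/') = '/' :: R := by
  induction p with
  | nil => simp
  | cons c p' ih =>
    have hc : c ≠ '/' := fun e => h (e ▸ List.mem_cons_self ..)
    simp only [List.cons_append, List.dropWhile_cons]
    rw [if_pos (by simpa using hc)]
    exact ih (fun m => h (List.mem_cons_of_mem _ m))

theorem slashTok_ne (ts : List RTok) (c : Char) (r : List Char) (h : c ≠ '/') :
    pvReFullmatch (RTok.ch '/' :: ts) (c :: r) = false := by
  simp [pvReFullmatch]
  exact fun e => absurd e.symm h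

theorem litEq (q p : List Char) :
    (if q.isPrefixOf p then (List.drop q.length p).isEmpty else false) = (p == q) := by
  induction q generalizing p with
  | nil => cases p <;> simp [List.isPrefixOf]
  | cons a q' ih =>
    cases p with
    | nil => simp [List.isPrefixOf]
    | cons c p' =>
      simp only [List.isPrefixOf, List.length_cons, List.drop_succ_cons]
      by_cases hac : a = c
      · subst hac
        simp only [beq_self_eq_true, Bool.true_and, List.cons_beq_cons]
        exact ih p'
      · simp [hac]
        exact fun e => absurd e.symm hac

theorem lit_then_slash_false (q p R : List Char) (ts : List RTok)
    (hqq : '/' ∉ q) (hpp : '/' ∉ p) (hqp : q ≠ p) :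
    (if q.isPrefixOf (p ++ '/' :: R) then
        pvReFullmatch (RTok.ch '/' :: ts) ((p ++ '/' :: R).drop q.length)
      else false) = false := by
  split
  · rename_i hpre
    rw [List.isPrefixOf_iff_prefix] at hpre
    have hle : q.length ≤ p.length := by
      by_contra hgt
      push_neg at hgt
      have hlt : p.length < q.length := hgt
      have hcs : p.length < (p ++ '/' :: R).length := by simp
      have hch : (p ++ '/' :: R)[p.length]'hcs = '/' := by simp
      have hv : q[p.length]'hlt = '/' := (List.IsPrefix.getElem hpre hlt).trans hch
      exact hqq (hv ▸ q.getElem_mem hlt)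
    have hlt : q.length < p.length := by
      rcases Nat.lt_or_ge q.length p.length with h | h
      · exact h
      · have heq : q.length = p.length := le_antisymm hle h
        have : q <+: p := List.prefix_of_prefix_length_le hpre (List.prefix_append p _) hle
        exact absurd (List.IsPrefix.eq_of_length this heq) hqp
    rw [List.drop_append_of_le_length hle]
    rcases hd : p.drop q.length with _ | ⟨c, r⟩
    · rw [List.drop_eq_nil_iff] at hd
      omega
    · rw [List.cons_append]
      exact slashTok_ne _ c _ (fun e => hpp (e ▸ List.mem_of_mem_drop (hd ▸ List.mem_cons_self ..)))
  · rfl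

theorem reMatch_correct (qs ps : List (List Char))
    (hp : ∀ p ∈ ps, '/' ∉ p) (hq : ∀ q ∈ qs, '/' ∉ q) (hqn : qs ≠ []) (hpn : ps ≠ []) :
    pvReFullmatch (List.intercalate [RTok.ch '/'] (qs.map tokC)) (List.intercalate ['/'] ps) =
      (decide (ps.length = qs.length) && (ps.zip qs).all chSeg) := by
  induction qs generalizing ps with
  | nil => exact absurd rfl hqn
  | cons q qs' ih =>
    rcases ps with _ | ⟨p, ps'⟩
    · exact absurd rfl hpn
    have hqq : '/' ∉ q := hq q (List.mem_cons_self ..)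
    have hpp : '/' ∉ p := hp p (List.mem_cons_self ..)
    have hptail : ∀ x ∈ ps', '/' ∉ x := fun x hx => hp x (List.mem_cons_of_mem _ hx)
    have hqtail : ∀ x ∈ qs', '/' ∉ x := fun x hx => hq x (List.mem_cons_of_mem _ hx)
    by_cases hw : isWildC q = true
    · rcases qs' with _ | ⟨q2, qs''⟩
      · rcases ps' with _ | ⟨p2, ps''⟩
        · rw [show List.map tokC [q] = [tokC q] from rfl, inter1, inter1, tokC, if_pos hw]
          simp only [pvReFullmatch, dw_nil p hpp]
          simp [chSeg, hw]
        · rw [show List.map tokC [q] = [tokC q] from rfl, inter1, inter2 _ _ _ (by simp), tokC, if_pos hw]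
          simp only [pvReFullmatch, dw_app p _ hpp]
          simp
      · rcases ps' with _ | ⟨p2, ps''⟩
        · rw [show List.map tokC (q :: q2 :: qs'') = tokC q :: List.map tokC (q2 :: qs'') from rfl,
              inter2 _ _ _ (by simp), inter1, tokC, if_pos hw]
          simp only [List.cons_append, List.nil_append, pvReFullmatch, dw_nil p hpp]
          simp
        · rw [show List.map tokC (q :: q2 :: qs'') = tokC q :: List.map tokC (q2 :: qs'') from rfl,
              inter2 _ _ _ (by simp), inter2 _ _ _ (by simp), tokC, if_pos hw]
          simp only [List.cons_append, List.nil_append, pvReFullmatch, dw_app p _ hpp]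
          simp only [beq_self_eq_true, Bool.true_and]
          rw [ih (p2 :: ps'') hptail hqtail (by simp) (by simp)]
          simp [chSeg, hw]
    · rcases qs' with _ | ⟨q2, qs''⟩
      · rcases ps' with _ | ⟨p2, ps''⟩
        · rw [show List.map tokC [q] = [tokC q] from rfl, inter1, inter1, tokC, if_neg hw,
              ← List.append_nil (q.map RTok.ch), lit_match]
          have h0 : pvReFullmatch [] (List.drop q.length p) = (List.drop q.length p).isEmpty := rfl
          rw [h0, litEq]
          simp [chSeg, hw]
        · rw [show List.map tokC [q] = [tokC q] from rfl, inter1, inter2 _ _ _ (by simp), tokC, if_neg hw,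
              ← List.append_nil (q.map RTok.ch), lit_match]
          have hfalse : (if q.isPrefixOf (p ++ '/' :: List.intercalate ['/'] (p2 :: ps'')) then
              pvReFullmatch [] ((p ++ '/' :: List.intercalate ['/'] (p2 :: ps'')).drop q.length)
              else false) = false := by
            split
            · rename_i hpre
              rw [List.isPrefixOf_iff_prefix] at hpre
              have h1 := hpre.length_le
              by_cases hz : (p ++ '/' :: List.intercalate ['/'] (p2 :: ps'')).length ≤ q.length
              · have heq2 : q = p ++ '/' :: List.intercalate ['/'] (p2 :: ps'') :=
                  List.IsPrefix.eq_of_length hpre (le_antisymm h1 hz)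
                exact absurd (heq2 ▸ (by simp : '/' ∈ p ++ '/' :: List.intercalate ['/'] (p2 :: ps''))) hqq
              · push_neg at hz
                simp only [pvReFullmatch]
                rw [List.isEmpty_eq_false_iff, Ne, List.drop_eq_nil_iff]
                omega
            · rfl
          rw [hfalse]
          simp
      · rcases ps' with _ | ⟨p2, ps''⟩
        · rw [show List.map tokC (q :: q2 :: qs'') = tokC q :: List.map tokC (q2 :: qs'') from rfl,
              inter2 _ _ _ (by simp), inter1, tokC, if_neg hw, lit_match]
          have hfalse : (if q.isPrefixOf p then
              pvReFullmatch (RTok.ch '/' :: List.intercalate [RTok.ch '/'] (List.map tokC (q2 :: qs'')))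
                (p.drop q.length) else false) = false := by
            split
            · rcases hd : p.drop q.length with _ | ⟨c, r⟩
              · rfl
              · exact slashTok_ne _ c _
                  (fun e => hpp (e ▸ List.mem_of_mem_drop (hd ▸ List.mem_cons_self ..)))
            · rfl
          rw [hfalse]
          simp
        · rw [show List.map tokC (q :: q2 :: qs'') = tokC q :: List.map tokC (q2 :: qs'') from rfl,
              inter2 _ _ _ (by simp), inter2 _ _ _ (by simp), tokC, if_neg hw, lit_match]
          by_cases hqp : q = p
          · rw [if_pos (by rw [List.isPrefixOf_iff_prefix]; exact hqp ▸ List.prefix_append q _),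
                hqp, List.drop_left]
            have hstep : pvReFullmatch
                (RTok.ch '/' :: List.intercalate [RTok.ch '/'] (List.map tokC (q2 :: qs'')))
                ('/' :: List.intercalate ['/'] (p2 :: ps'')) =
                pvReFullmatch (List.intercalate [RTok.ch '/'] (List.map tokC (q2 :: qs'')))
                  (List.intercalate ['/'] (p2 :: ps'')) := by
              simp [pvReFullmatch]
            rw [hstep, ih (p2 :: ps'') hptail hqtail (by simp) (by simp)]
            have hc : chSeg (p, p) = true := by simp [chSeg]
            simp only [List.length_cons, List.zip_cons_cons, List.all_cons, hc, Bool.true_and,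
              Nat.add_right_cancel_iff]
          · rw [lit_then_slash_false q p _ _ hqq hpp hqp]
            have hc : chSeg (p, q) = false := by
              simp [chSeg, hw]
              exact fun e => absurd e.symm hqp
            simp [hc]

theorem route_eq (path pattern : String) :
    pvRouteMatchesPattern path pattern =
      pvReFullmatch (pvPatternRegex pattern) (PySem.Str.stripChars path "/").toList := by
  have hsp : (PySem.Str.stripChars path "/").toList = PySem.Chars.stripChars path.toList ['/'] := by
    simpa using PySem.Str.toList_stripChars path "/"
  set sp := PySem.Chars.stripChars path.toList ['/'] with hspdef
  set sq := PySem.Chars.stripChars pattern.toList ['/'] with hsqdef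
  have hmapf : ∀ qs : List (List Char),
      (qs.map String.ofList).map (fun p => if PySem.Str.startswith p "{{" && PySem.Str.endswith p "}}"
        then [RTok.star] else p.toList.map RTok.ch) = qs.map tokC := by
    intro qs
    rw [List.map_map]
    apply List.map_congr_left
    intro q _
    simp [tokC, isWildC, PySem.Str.startswith_eq, PySem.Str.endswith_eq]
  have hRHS : pvReFullmatch (pvPatternRegex pattern) (PySem.Str.stripChars path "/").toList =
      (decide ((splitC sp).length = (splitC sq).length) && ((splitC sp).zip (splitC sq)).all chSeg) := by
    rw [hsp]
    unfold pvPatternRegex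
    rw [pvStripSplit_eq, hmapf, ← hsqdef]
    have h := reMatch_correct (splitC sq) (splitC sp) (noslash_splitC sp) (noslash_splitC sq)
      (splitC_ne_nil sq) (splitC_ne_nil sp)
    rw [join_splitC sp] at h
    exact h
  rw [hRHS]
  unfold pvRouteMatchesPattern
  rw [pvStripSplit_eq, pvStripSplit_eq, ← hspdef, ← hsqdef]
  simp only [List.length_map]
  by_cases hl : (splitC sp).length = (splitC sq).length
  · rw [if_neg (by omega), matchLoop_char]
    simp [hl]
  · rw [if_pos (by omega)]
    simp [hl]

theorem findLoop_eq (path : String) (routes : List (List (String × String))) :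
    pvFindLoop path routes =
      routes.find? (fun rc =>
        pvReFullmatch (pvPatternRegex (pvAGetD rc "route" ""))
          (PySem.Str.stripChars path "/").toList) := by
  induction routes with
  | nil => rfl
  | cons rc rest ih =>
    simp only [pvFindLoop, List.find?_cons, route_eq]
    split <;> simp_all

-- ===== VERDICT (by name: the statement is the Claim_ definition above) =====
theorem find_database_route_spec : Claim_equal_find_database_route := by
  intro path cfg _
  unfold Spec_find_database_route find_database_route find_database_route_alt
  exact findLoop_eq path (pvAGetD cfg "routes" [])
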